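-- pv_equiv track=rewrite | github.com/jameswalls/advent_of_code_2024 | days/06/part2.py | find_dominant_char
-- ===== SOURCE A (Python) =====
-- def find_dominant_char(mapped_passings: list[str]) -> str:
--     current_char = mapped_passings[0]
--     for char in mapped_passings[1:]:
--         if current_char in ["^", "v", ">", "<", "+"]:
--             return current_char
--
--         if current_char != char:
--             return "+"
--
--         current_char = char
--
--     return current_char
-- ===== SOURCE B (Python) =====
-- def find_dominant_char(mapped_passings: list[str]) -> str:
--     first = mapped_passings[0]
--     if first in {"^", "v", ">", "<", "+"}:
--         return first
--     if len(set(mapped_passings)) == 1: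
--         return first
--     return "+"
-- ===== Notes on version B (the rewrite author's own statement) =====
-- stated objective: simpler
-- what changed: Replaces the early-exit pairwise scan with a current-char accumulator by building the set of distinct strings once and checking its cardinality (after the same first-element special-char guard).
import Mathlib
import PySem

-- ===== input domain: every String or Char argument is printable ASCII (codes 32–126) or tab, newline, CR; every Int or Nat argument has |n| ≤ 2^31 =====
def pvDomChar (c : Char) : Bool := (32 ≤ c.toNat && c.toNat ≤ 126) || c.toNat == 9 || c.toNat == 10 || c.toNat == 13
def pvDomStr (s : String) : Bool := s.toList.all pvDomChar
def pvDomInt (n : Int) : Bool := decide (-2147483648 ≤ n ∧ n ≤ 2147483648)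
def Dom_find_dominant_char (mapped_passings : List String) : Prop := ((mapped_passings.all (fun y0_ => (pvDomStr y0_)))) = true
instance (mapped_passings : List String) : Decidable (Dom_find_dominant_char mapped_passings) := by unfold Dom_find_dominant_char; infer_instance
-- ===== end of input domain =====

-- B replaces A's early-exit pairwise scan with a set-cardinality check; objective: simpler.


-- ===== PORT A =====
-- the for-loop of A: carries current_char, branches in the source order
def find_dominant_loopA (current : String) : List String → String
  | [] => current
  | ch :: rest =>
    if current ∈ ["^", "v", ">", "<", "+"] then current
    else if current ≠ ch then "+"
    else find_dominant_loopA ch rest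

-- mapped_passings[0] raises IndexError on []; Pre_ excludes the empty list
def find_dominant_char (mapped_passings : List String) : String :=
  find_dominant_loopA (PySem.List.pyGetD mapped_passings 0 "")
    (PySem.List.slice mapped_passings (some 1) none)

-- ===== PORT B =====
def find_dominant_char_alt (mapped_passings : List String) : String :=
  let first := PySem.List.pyGetD mapped_passings 0 ""
  if first ∈ ["^", "v", ">", "<", "+"] then first
  else if PySem.Set.len (PySem.Set.ofList mapped_passings) = 1 then first
  else "+"

-- ===== PRECONDITION & SPEC =====
-- A raises IndexError on the empty list (mapped_passings[0]); B raises there too.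
def Pre_find_dominant_char (mapped_passings : List String) : Prop := mapped_passings ≠ []
instance (mapped_passings : List String) : Decidable (Pre_find_dominant_char mapped_passings) := by unfold Pre_find_dominant_char; infer_instance
def pvWitness_find_dominant_char : List String := ["a", "a"]

def Spec_find_dominant_char (mapped_passings : List String) (out : String) : Prop := out = find_dominant_char_alt mapped_passings
instance (mapped_passings : List String) (out : String) : Decidable (Spec_find_dominant_char mapped_passings out) := by unfold Spec_find_dominant_char; infer_instance

-- ===== CLAIM (what is proved, stated in full; the proofs are below) =====
def Claim_equal_find_dominant_char : Prop := ∀ (mapped_passings : List String), Dom_find_dominant_char mapped_passings → Pre_find_dominant_char mapped_passings → Spec_find_dominant_char mapped_passings (find_dominant_char mapped_passings)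

-- ===== LEMMAS AND PROOFS =====

-- if the head is not special, the loop returns the head iff every later element equals it
theorem loopA_char (first : String) (h : first ∉ ["^", "v", ">", "<", "+"]) :
    ∀ rest : List String,
      find_dominant_loopA first rest =
        (if ∀ x ∈ rest, x = first then first else "+") := by
  intro rest
  induction rest with
  | nil => simp [find_dominant_loopA]
  | cons ch rest ih =>
    by_cases hch : ch = first
    · subst hch
      simp only [find_dominant_loopA, if_neg h]
      rw [if_neg (by simp), ih]
      simp
    · simp [find_dominant_loopA, h, Ne.symm hch, hch]

theorem foldl_add_all_eq {α : Type} [BEq α] [LawfulBEq α]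
    (first : α) (l : List α) (h : ∀ x ∈ l, x = first) :
    l.foldl PySem.Set.add [first] = [first] := by
  induction l with
  | nil => rfl
  | cons a l ih =>
    have ha := h a (List.mem_cons_self ..)
    subst ha
    have : PySem.Set.add [a] a = [a] := by
      simp [PySem.Set.add, PySem.Set.contains]
    rw [List.foldl_cons, this]
    exact ih (fun x hx => h x (List.mem_cons_of_mem _ hx))

-- set(first :: rest) has one element iff every element of rest equals first
theorem ofList_len_one (first : String) (rest : List String) :
    (PySem.Set.len (PySem.Set.ofList (first :: rest)) = 1) ↔ (∀ x ∈ rest, x = first) := by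
  constructor
  · intro hlen x hx
    by_contra hne
    have h1 : first ∈ PySem.Set.ofList (first :: rest) :=
      (PySem.Set.mem_ofList _ _).mpr (List.mem_cons_self ..)
    have h2 : x ∈ PySem.Set.ofList (first :: rest) :=
      (PySem.Set.mem_ofList _ _).mpr (List.mem_cons_of_mem _ hx)
    match hs : PySem.Set.ofList (first :: rest), hlen with
    | [y], _ =>
      rw [hs] at h1 h2
      simp only [List.mem_singleton] at h1 h2
      exact hne (h2.trans h1.symm)
  · intro hall
    have : PySem.Set.ofList (first :: rest) = [first] := by
      rw [PySem.Set.ofList_eq_foldl]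
      have : PySem.Set.add [] first = [first] := rfl
      rw [List.foldl_cons, this]
      exact foldl_add_all_eq first rest hall
    rw [this]; rfl

-- ===== VERDICT (by name: the statement is the Claim_ definition above) =====
theorem find_dominant_char_spec : Claim_equal_find_dominant_char := by
  intro l _ hpre
  match l with
  | [] => exact absurd rfl hpre
  | first :: rest =>
    unfold Spec_find_dominant_char find_dominant_char find_dominant_char_alt
    simp only [PySem.List.pyGetD_zero_cons, PySem.List.slice_from_one, List.tail_cons]
    by_cases hs : first ∈ ["^", "v", ">", "<", "+"]
    · rw [if_pos hs]
      cases rest with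
      | nil => simp [find_dominant_loopA]
      | cons a t => simp [find_dominant_loopA, hs]
    · rw [if_neg hs, loopA_char first hs rest]
      congr 1
      exact propext ((ofList_len_one first rest).symm)
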